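-- pv_equiv track=rewrite | github.com/981377660LMT/algorithm-study | 22_专题/区间问题/区间操作/reduceInterval.py | reduceIntervals
-- ===== SOURCE A (Python) =====
-- from typing import List, Tuple
--
-- def reduceIntervals(intervals: List[Tuple[int, int]], removeIncluded=True) -> List[int]:
--     """删除重叠区间.
--
--     Args:
--         intervals (List[Tuple[int, int]]): 左闭右开区间.
--         removeIncluded (bool, optional): 是删除包含的区间还是被包含的区间.默认为删除被包含的区间.
--
--     Returns:
--         List[int]: 按照区间的起点排序的剩余的区间索引(相同的区间会保留).
--     """
--     n = len(intervals)
--     res = []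
--     order = list(range(n))
--     if removeIncluded:
--         order.sort(key=lambda i: (intervals[i][0], -intervals[i][1]))
--         for cur in order:
--             if res:
--                 pre = res[-1]
--                 curStart, curEnd = intervals[cur]
--                 preStart, preEnd = intervals[pre]
--                 if curEnd <= preEnd and curEnd - curStart < preEnd - preStart:
--                     continue
--             res.append(cur)
--     else:
--         order.sort(key=lambda i: (intervals[i][1], -intervals[i][0]))
--         for cur in order:
--             if res:
--                 pre = res[-1]
--                 curStart, curEnd = intervals[cur]
--                 preStart, preEnd = intervals[pre]
--                 if curStart <= preStart and curEnd - curStart > preEnd - preStart: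
--                     continue
--             res.append(cur)
--     return res
-- ===== SOURCE B (Python) =====
-- from typing import List, Tuple
--
-- def reduceIntervals(intervals: List[Tuple[int, int]], removeIncluded=True) -> List[int]:
--     """Pairwise scan instead of a sorted sweep with a 'last kept' state: an index
--     survives iff no other interval strictly contains it (resp. iff it strictly
--     contains no other interval); survivors are listed in sorted key order."""
--     n = len(intervals)
--     if removeIncluded:
--         def key(i):
--             return (intervals[i][0], -intervals[i][1])
--         def removed(i):
--             s, e = intervals[i]
--             return any(js <= s and e <= je and je - js > e - s for js, je in intervals)
--     else:
--         def key(i):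
--             return (intervals[i][1], -intervals[i][0])
--         def removed(i):
--             s, e = intervals[i]
--             return any(s <= js and je <= e and je - js < e - s for js, je in intervals)
--     return [i for i in sorted(range(n), key=key) if not removed(i)]
-- ===== Notes on version B (the rewrite author's own statement) =====
-- stated objective: alternative
-- what changed: Replaces A's sorted sweep that compares each interval with the last kept one by a stateless pairwise test: an index survives iff no other interval strictly contains it (resp. iff it strictly contains no other), survivors listed in the same sorted key order.
import Mathlib
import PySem

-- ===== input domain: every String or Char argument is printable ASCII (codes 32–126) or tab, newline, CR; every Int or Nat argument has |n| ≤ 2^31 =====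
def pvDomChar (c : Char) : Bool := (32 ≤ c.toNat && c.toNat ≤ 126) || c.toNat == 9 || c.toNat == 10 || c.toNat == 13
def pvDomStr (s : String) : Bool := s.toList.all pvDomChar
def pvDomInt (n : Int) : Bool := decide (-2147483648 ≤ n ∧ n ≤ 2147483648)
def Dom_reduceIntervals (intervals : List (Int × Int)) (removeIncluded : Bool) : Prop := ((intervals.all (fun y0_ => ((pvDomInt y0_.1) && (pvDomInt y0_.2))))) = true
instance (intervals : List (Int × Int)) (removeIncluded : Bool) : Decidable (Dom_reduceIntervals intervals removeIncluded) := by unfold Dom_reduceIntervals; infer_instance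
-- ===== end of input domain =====

-- B replaces A's sorted sweep (compare with the last kept interval) by a stateless pairwise
-- containment test over all intervals (objective: alternative; same results, no speed claim).

-- ===== PORT A =====
-- A's for-loop over the sorted order, removeIncluded=True branch: res[-1] is read via getLast?,
-- res.append(cur) is res ++ [cur].
def reduceLoopInc (f : Int → Int × Int) : List Int → List Int → List Int
  | res, [] => res
  | res, cur :: rest =>
    match res.getLast? with
    | none => reduceLoopInc f (res ++ [cur]) rest
    | some pre =>
      if (f cur).2 ≤ (f pre).2 ∧ (f cur).2 - (f cur).1 < (f pre).2 - (f pre).1 then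
        reduceLoopInc f res rest
      else
        reduceLoopInc f (res ++ [cur]) rest

-- A's for-loop, removeIncluded=False branch.
def reduceLoopExc (f : Int → Int × Int) : List Int → List Int → List Int
  | res, [] => res
  | res, cur :: rest =>
    match res.getLast? with
    | none => reduceLoopExc f (res ++ [cur]) rest
    | some pre =>
      if (f cur).1 ≤ (f pre).1 ∧ (f cur).2 - (f cur).1 > (f pre).2 - (f pre).1 then
        reduceLoopExc f res rest
      else
        reduceLoopExc f (res ++ [cur]) rest

def reduceIntervals (intervals : List (Int × Int)) (removeIncluded : Bool) : List Int :=
  let n : Int := intervals.length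
  let f : Int → Int × Int := fun i => PySem.List.pyGetD intervals i (0, 0)
  if removeIncluded then
    reduceLoopInc f []
      (PySem.List.sorted2 (PySem.List.pyRange 0 n 1) (fun i => (f i).1) (fun i => -(f i).2))
  else
    reduceLoopExc f []
      (PySem.List.sorted2 (PySem.List.pyRange 0 n 1) (fun i => (f i).2) (fun i => -(f i).1))

-- ===== PORT B =====
-- B: sort the indices with the same key, then keep i iff no interval strictly contains
-- intervals[i] (True branch) / intervals[i] strictly contains no interval (False branch).
def reduceIntervals_alt (intervals : List (Int × Int)) (removeIncluded : Bool) : List Int :=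
  let n : Int := intervals.length
  let f : Int → Int × Int := fun i => PySem.List.pyGetD intervals i (0, 0)
  if removeIncluded then
    (PySem.List.sorted2 (PySem.List.pyRange 0 n 1)
        (fun i => (f i).1) (fun i => -(f i).2)).filter (fun i =>
      ! intervals.any (fun q =>
        decide (q.1 ≤ (f i).1) && decide ((f i).2 ≤ q.2) && decide (q.2 - q.1 > (f i).2 - (f i).1)))
  else
    (PySem.List.sorted2 (PySem.List.pyRange 0 n 1)
        (fun i => (f i).2) (fun i => -(f i).1)).filter (fun i =>
      ! intervals.any (fun q =>
        decide ((f i).1 ≤ q.1) && decide (q.2 ≤ (f i).2) && decide (q.2 - q.1 < (f i).2 - (f i).1)))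

-- ===== PRECONDITION & SPEC =====
def Spec_reduceIntervals (intervals : List (Int × Int)) (removeIncluded : Bool) (out : List Int) : Prop := out = reduceIntervals_alt intervals removeIncluded
instance (intervals : List (Int × Int)) (removeIncluded : Bool) (out : List Int) : Decidable (Spec_reduceIntervals intervals removeIncluded out) := by unfold Spec_reduceIntervals; infer_instance

-- ===== CLAIM (what is proved, stated in full; the proofs are below) =====
def Claim_equal_reduceIntervals : Prop := ∀ (intervals : List (Int × Int)) (removeIncluded : Bool), Dom_reduceIntervals intervals removeIncluded → Spec_reduceIntervals intervals removeIncluded (reduceIntervals intervals removeIncluded)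

-- ===== LEMMAS AND PROOFS =====

lemma lex_pair_le {a b c d : Int} : toLex (a, b) ≤ toLex (c, d) ↔ (a < c ∨ (a = c ∧ b ≤ d)) := by
  simpa using Prod.Lex.toLex_le_toLex (x := (a, b)) (y := (c, d))

-- Python's two-component tuple key is the lexicographic order on pairs.
lemma sorted2_eq_sorted_lex {α : Type} (xs : List α) (k1 k2 : α → Int) :
    PySem.List.sorted2 xs k1 k2 = PySem.List.sorted xs (fun x => toLex (k1 x, k2 x)) := by
  show List.foldl (fun acc x => PySem.List.insertBy
      (fun a b => decide (k1 a < k1 b) || (!decide (k1 b < k1 a) && decide (k2 a < k2 b))) x acc) [] xs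
    = List.foldl (fun acc x => PySem.List.insertBy
      (fun a b => decide (toLex (k1 a, k2 a) < toLex (k1 b, k2 b))) x acc) [] xs
  rw [show (fun a b => decide (k1 a < k1 b) || (!decide (k1 b < k1 a) && decide (k2 a < k2 b)))
      = (fun a b : α => decide (toLex (k1 a, k2 a) < toLex (k1 b, k2 b))) from ?_]
  funext a b
  by_cases h1 : k1 a < k1 b <;> by_cases h2 : k1 b < k1 a <;> by_cases h3 : k2 a < k2 b <;>
    simp [h1, h2, h3, Prod.Lex.toLex_lt_toLex] <;> omega

-- Invariant proof for the True branch: the last kept index p has the maximal end among all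
-- intervals whose sorted position is already passed, and nothing strictly contains p;
-- under that, A's sweep keeps exactly the indices B's pairwise filter keeps.
lemma loopInc_eq (f : Int → Int × Int) (S : List (Int × Int)) :
    ∀ (rest acc : List Int) (p : Int),
      acc.getLast? = some p →
      f p ∈ S →
      (∀ i ∈ rest, f i ∈ S) →
      List.Pairwise (fun a b => toLex ((f a).1, -(f a).2) ≤ toLex ((f b).1, -(f b).2)) rest →
      (∀ i ∈ rest, toLex ((f p).1, -(f p).2) ≤ toLex ((f i).1, -(f i).2)) →
      (∀ q ∈ S, ¬(q.1 ≤ (f p).1 ∧ (f p).2 ≤ q.2 ∧ q.2 - q.1 > (f p).2 - (f p).1)) →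
      (∀ q ∈ S, (∃ j ∈ rest, f j = q) ∨ q.2 ≤ (f p).2) →
      reduceLoopInc f acc rest = acc ++ rest.filter (fun i =>
        ! S.any (fun q =>
          decide (q.1 ≤ (f i).1) && decide ((f i).2 ≤ q.2) && decide (q.2 - q.1 > (f i).2 - (f i).1))) := by
  intro rest
  induction rest with
  | nil => intro acc p _ _ _ _ _ _ _; simp [reduceLoopInc]
  | cons cur t ih =>
    intro acc p hlast hpS hmem hpair hkey hnrem hinv
    have hkc := lex_pair_le.mp (hkey cur (by simp))
    obtain ⟨hhead, htail⟩ := List.pairwise_cons.mp hpair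
    by_cases hc : (f cur).2 ≤ (f p).2 ∧ (f cur).2 - (f cur).1 < (f p).2 - (f p).1
    · -- cur is removed by A; it is also strictly contained (in f p), so B drops it
      have hrem : (S.any (fun q =>
          decide (q.1 ≤ (f cur).1) && decide ((f cur).2 ≤ q.2) && decide (q.2 - q.1 > (f cur).2 - (f cur).1))) = true := by
        simp only [List.any_eq_true, Bool.and_eq_true, decide_eq_true_eq]
        exact ⟨f p, hpS, ⟨by omega, by omega⟩, by omega⟩
      simp only [reduceLoopInc, hlast, if_pos hc, List.filter_cons, hrem, Bool.not_true,
        Bool.false_eq_true, if_false]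
      exact ih acc p hlast hpS (fun i hi => hmem i (by simp [hi])) htail
        (fun i hi => hkey i (by simp [hi])) hnrem
        (fun q hq => by
          rcases hinv q hq with ⟨j, hj, hEq⟩ | hb
          · rcases List.mem_cons.mp hj with rfl | hjt
            · subst hEq; exact Or.inr (by omega)
            · exact Or.inl ⟨j, hjt, hEq⟩
          · exact Or.inr hb)
    · -- cur is kept by A; nothing strictly contains it, so B keeps it too
      have hnremc : ∀ q ∈ S, ¬(q.1 ≤ (f cur).1 ∧ (f cur).2 ≤ q.2 ∧ q.2 - q.1 > (f cur).2 - (f cur).1) := by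
        intro q hq hcont
        rcases hinv q hq with ⟨j, hj, hEq⟩ | hb
        · rcases List.mem_cons.mp hj with rfl | hjt
          · subst hEq; omega
          · have hkj := lex_pair_le.mp (hhead j hjt)
            rw [hEq] at hkj; omega
        · have hn := hnrem q hq
          omega
      have hkeep : (! S.any (fun q =>
          decide (q.1 ≤ (f cur).1) && decide ((f cur).2 ≤ q.2) && decide (q.2 - q.1 > (f cur).2 - (f cur).1))) = true := by
        simp only [Bool.not_eq_true', List.any_eq_false, Bool.and_eq_true, decide_eq_true_eq]
        intro q hq
        have := hnremc q hq
        tauto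
      simp only [reduceLoopInc, hlast, if_neg hc, List.filter_cons, hkeep]
      rw [ih (acc ++ [cur]) cur List.getLast?_concat (hmem cur (by simp))
        (fun i hi => hmem i (by simp [hi])) htail (fun i hi => hhead i hi) hnremc
        (fun q hq => by
          rcases hinv q hq with ⟨j, hj, hEq⟩ | hb
          · rcases List.mem_cons.mp hj with rfl | hjt
            · subst hEq; exact Or.inr le_rfl
            · exact Or.inl ⟨j, hjt, hEq⟩
          · exact Or.inr (by omega))]
      simp

-- Mirror invariant for the False branch: the last kept index p has the maximal start among
-- passed intervals, and p strictly contains nothing.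
lemma loopExc_eq (f : Int → Int × Int) (S : List (Int × Int)) :
    ∀ (rest acc : List Int) (p : Int),
      acc.getLast? = some p →
      f p ∈ S →
      (∀ i ∈ rest, f i ∈ S) →
      List.Pairwise (fun a b => toLex ((f a).2, -(f a).1) ≤ toLex ((f b).2, -(f b).1)) rest →
      (∀ i ∈ rest, toLex ((f p).2, -(f p).1) ≤ toLex ((f i).2, -(f i).1)) →
      (∀ q ∈ S, ¬((f p).1 ≤ q.1 ∧ q.2 ≤ (f p).2 ∧ q.2 - q.1 < (f p).2 - (f p).1)) →
      (∀ q ∈ S, (∃ j ∈ rest, f j = q) ∨ q.1 ≤ (f p).1) →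
      reduceLoopExc f acc rest = acc ++ rest.filter (fun i =>
        ! S.any (fun q =>
          decide ((f i).1 ≤ q.1) && decide (q.2 ≤ (f i).2) && decide (q.2 - q.1 < (f i).2 - (f i).1))) := by
  intro rest
  induction rest with
  | nil => intro acc p _ _ _ _ _ _ _; simp [reduceLoopExc]
  | cons cur t ih =>
    intro acc p hlast hpS hmem hpair hkey hnrem hinv
    have hkc := lex_pair_le.mp (hkey cur (by simp))
    obtain ⟨hhead, htail⟩ := List.pairwise_cons.mp hpair
    by_cases hc : (f cur).1 ≤ (f p).1 ∧ (f cur).2 - (f cur).1 > (f p).2 - (f p).1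
    · -- cur is removed by A; it also strictly contains f p, so B drops it
      have hrem : (S.any (fun q =>
          decide ((f cur).1 ≤ q.1) && decide (q.2 ≤ (f cur).2) && decide (q.2 - q.1 < (f cur).2 - (f cur).1))) = true := by
        simp only [List.any_eq_true, Bool.and_eq_true, decide_eq_true_eq]
        exact ⟨f p, hpS, ⟨by omega, by omega⟩, by omega⟩
      simp only [reduceLoopExc, hlast, if_pos hc, List.filter_cons, hrem, Bool.not_true,
        Bool.false_eq_true, if_false]
      exact ih acc p hlast hpS (fun i hi => hmem i (by simp [hi])) htail
        (fun i hi => hkey i (by simp [hi])) hnrem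
        (fun q hq => by
          rcases hinv q hq with ⟨j, hj, hEq⟩ | hb
          · rcases List.mem_cons.mp hj with rfl | hjt
            · subst hEq; exact Or.inr (by omega)
            · exact Or.inl ⟨j, hjt, hEq⟩
          · exact Or.inr hb)
    · -- cur is kept by A; it strictly contains nothing, so B keeps it too
      have hnremc : ∀ q ∈ S, ¬((f cur).1 ≤ q.1 ∧ q.2 ≤ (f cur).2 ∧ q.2 - q.1 < (f cur).2 - (f cur).1) := by
        intro q hq hcont
        rcases hinv q hq with ⟨j, hj, hEq⟩ | hb
        · rcases List.mem_cons.mp hj with rfl | hjt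
          · subst hEq; omega
          · have hkj := lex_pair_le.mp (hhead j hjt)
            rw [hEq] at hkj; omega
        · have hn := hnrem q hq
          omega
      have hkeep : (! S.any (fun q =>
          decide ((f cur).1 ≤ q.1) && decide (q.2 ≤ (f cur).2) && decide (q.2 - q.1 < (f cur).2 - (f cur).1))) = true := by
        simp only [Bool.not_eq_true', List.any_eq_false, Bool.and_eq_true, decide_eq_true_eq]
        intro q hq
        have := hnremc q hq
        tauto
      simp only [reduceLoopExc, hlast, if_neg hc, List.filter_cons, hkeep]
      rw [ih (acc ++ [cur]) cur List.getLast?_concat (hmem cur (by simp))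
        (fun i hi => hmem i (by simp [hi])) htail (fun i hi => hhead i hi) hnremc
        (fun q hq => by
          rcases hinv q hq with ⟨j, hj, hEq⟩ | hb
          · rcases List.mem_cons.mp hj with rfl | hjt
            · subst hEq; exact Or.inr le_rfl
            · exact Or.inl ⟨j, hjt, hEq⟩
          · exact Or.inr (by omega))]
      simp

lemma branchInc (f : Int → Int × Int) (S : List (Int × Int)) (order : List Int)
    (hpair : List.Pairwise (fun a b => toLex ((f a).1, -(f a).2) ≤ toLex ((f b).1, -(f b).2)) order)
    (hmem : ∀ i ∈ order, f i ∈ S)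
    (hwit : ∀ q ∈ S, ∃ j ∈ order, f j = q) :
    reduceLoopInc f [] order = order.filter (fun i =>
      ! S.any (fun q =>
        decide (q.1 ≤ (f i).1) && decide ((f i).2 ≤ q.2) && decide (q.2 - q.1 > (f i).2 - (f i).1))) := by
  cases order with
  | nil => simp [reduceLoopInc]
  | cons i0 t =>
    obtain ⟨hhead, htail⟩ := List.pairwise_cons.mp hpair
    have hnr0 : ∀ q ∈ S, ¬(q.1 ≤ (f i0).1 ∧ (f i0).2 ≤ q.2 ∧ q.2 - q.1 > (f i0).2 - (f i0).1) := by
      intro q hq hcont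
      obtain ⟨j, hj, hEq⟩ := hwit q hq
      rcases List.mem_cons.mp hj with rfl | hjt
      · subst hEq; omega
      · have hkj := lex_pair_le.mp (hhead j hjt); rw [hEq] at hkj; omega
    have hkeep : (! S.any (fun q =>
        decide (q.1 ≤ (f i0).1) && decide ((f i0).2 ≤ q.2) && decide (q.2 - q.1 > (f i0).2 - (f i0).1))) = true := by
      simp only [Bool.not_eq_true', List.any_eq_false, Bool.and_eq_true, decide_eq_true_eq]
      intro q hq
      have := hnr0 q hq
      tauto
    have hstep : reduceLoopInc f [] (i0 :: t) = reduceLoopInc f [i0] t := by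
      simp [reduceLoopInc]
    rw [hstep, loopInc_eq f S t [i0] i0 rfl (hmem i0 (by simp))
      (fun i hi => hmem i (by simp [hi])) htail (fun i hi => hhead i hi) hnr0
      (fun q hq => by
        obtain ⟨j, hj, hEq⟩ := hwit q hq
        rcases List.mem_cons.mp hj with rfl | hjt
        · subst hEq; exact Or.inr le_rfl
        · exact Or.inl ⟨j, hjt, hEq⟩)]
    simp [hkeep]

lemma branchExc (f : Int → Int × Int) (S : List (Int × Int)) (order : List Int)
    (hpair : List.Pairwise (fun a b => toLex ((f a).2, -(f a).1) ≤ toLex ((f b).2, -(f b).1)) order)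
    (hmem : ∀ i ∈ order, f i ∈ S)
    (hwit : ∀ q ∈ S, ∃ j ∈ order, f j = q) :
    reduceLoopExc f [] order = order.filter (fun i =>
      ! S.any (fun q =>
        decide ((f i).1 ≤ q.1) && decide (q.2 ≤ (f i).2) && decide (q.2 - q.1 < (f i).2 - (f i).1))) := by
  cases order with
  | nil => simp [reduceLoopExc]
  | cons i0 t =>
    obtain ⟨hhead, htail⟩ := List.pairwise_cons.mp hpair
    have hnr0 : ∀ q ∈ S, ¬((f i0).1 ≤ q.1 ∧ q.2 ≤ (f i0).2 ∧ q.2 - q.1 < (f i0).2 - (f i0).1) := by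
      intro q hq hcont
      obtain ⟨j, hj, hEq⟩ := hwit q hq
      rcases List.mem_cons.mp hj with rfl | hjt
      · subst hEq; omega
      · have hkj := lex_pair_le.mp (hhead j hjt); rw [hEq] at hkj; omega
    have hkeep : (! S.any (fun q =>
        decide ((f i0).1 ≤ q.1) && decide (q.2 ≤ (f i0).2) && decide (q.2 - q.1 < (f i0).2 - (f i0).1))) = true := by
      simp only [Bool.not_eq_true', List.any_eq_false, Bool.and_eq_true, decide_eq_true_eq]
      intro q hq
      have := hnr0 q hq
      tauto
    have hstep : reduceLoopExc f [] (i0 :: t) = reduceLoopExc f [i0] t := by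
      simp [reduceLoopExc]
    rw [hstep, loopExc_eq f S t [i0] i0 rfl (hmem i0 (by simp))
      (fun i hi => hmem i (by simp [hi])) htail (fun i hi => hhead i hi) hnr0
      (fun q hq => by
        obtain ⟨j, hj, hEq⟩ := hwit q hq
        rcases List.mem_cons.mp hj with rfl | hjt
        · subst hEq; exact Or.inr le_rfl
        · exact Or.inl ⟨j, hjt, hEq⟩)]
    simp [hkeep]

-- Every interval value is hit by some index of the sorted range, and every index of the
-- sorted range looks up a member of the list.
lemma order_mem (intervals : List (Int × Int)) (i : Int)
    (hi : i ∈ PySem.List.pyRange 0 (intervals.length : Int) 1) :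
    PySem.List.pyGetD intervals i (0, 0) ∈ intervals := by
  have h := PySem.List.mem_pyRange_one.mp hi
  exact PySem.List.pyGetD_mem intervals (0, 0) ⟨by omega, by omega⟩

lemma order_wit (intervals : List (Int × Int)) (q : Int × Int) (hq : q ∈ intervals) :
    ∃ j ∈ PySem.List.pyRange 0 (intervals.length : Int) 1,
      PySem.List.pyGetD intervals j (0, 0) = q := by
  obtain ⟨k, hk, hEq⟩ := List.mem_iff_getElem.mp hq
  refine ⟨(k : Int), PySem.List.mem_pyRange_one.mpr ⟨by omega, by exact_mod_cast hk⟩, ?_⟩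
  rw [PySem.List.pyGetD_natCast, List.getD_eq_getElem _ _ hk]
  exact hEq

-- ===== VERDICT (by name: the statement is the Claim_ definition above) =====
theorem reduceIntervals_spec : Claim_equal_reduceIntervals := by
  intro intervals removeIncluded _
  unfold Spec_reduceIntervals reduceIntervals reduceIntervals_alt
  cases removeIncluded with
  | true =>
    simp only [if_true]
    rw [branchInc (fun i => PySem.List.pyGetD intervals i (0, 0)) intervals]
    · rw [sorted2_eq_sorted_lex]
      exact PySem.List.sorted_pairwise _ _
    · intro i hi
      have := (PySem.List.sorted2_perm _ _ _ _).mem_iff.mp hi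
      exact order_mem intervals i this
    · intro q hq
      obtain ⟨j, hj, hEq⟩ := order_wit intervals q hq
      exact ⟨j, (PySem.List.sorted2_perm _ _ _ _).mem_iff.mpr hj, hEq⟩
  | false =>
    simp only [Bool.false_eq_true, if_false]
    rw [branchExc (fun i => PySem.List.pyGetD intervals i (0, 0)) intervals]
    · rw [sorted2_eq_sorted_lex]
      exact PySem.List.sorted_pairwise _ _
    · intro i hi
      have := (PySem.List.sorted2_perm _ _ _ _).mem_iff.mp hi
      exact order_mem intervals i this
    · intro q hq
      obtain ⟨j, hj, hEq⟩ := order_wit intervals q hq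
      exact ⟨j, (PySem.List.sorted2_perm _ _ _ _).mem_iff.mpr hj, hEq⟩
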